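-- pv_equiv track=rewrite | github.com/ting1011/2026-python | weeks/week-10/solutions/1114405022/QUESTION-10252-easy.py | solve
-- ===== SOURCE A (Python) =====
-- from collections import Counter
--
-- def solve(data: str) -> str:
--     # 這題每兩行是一筆測資，讀到 EOF。
--     lines = data.splitlines()
--     ans = []
--
--     idx = 0
--     while idx + 1 < len(lines):
--         s1 = lines[idx]
--         s2 = lines[idx + 1]
--         idx += 2
--
--         # 分別統計兩字串中每個字元的出現次數。
--         c1 = Counter(s1)
--         c2 = Counter(s2)
--
--         # 共同字元的次數 = 兩邊次數的較小值。
--         parts = []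
--         common_chars = sorted(c1.keys() & c2.keys())
--         for ch in common_chars:
--             repeat = min(c1[ch], c2[ch])
--             parts.append(ch * repeat)
--
--         # 依字典序串起來就是答案。
--         ans.append("".join(parts))
--
--     return "\n".join(ans)
-- ===== SOURCE B (Python) =====
-- def solve(data: str) -> str:
--     # Two-pointer merge over the two sorted character sequences:
--     # equal chars are emitted (that yields exactly min(count) copies of each
--     # common char, already in sorted order); otherwise the smaller side advances.
--     lines = data.splitlines()
--     ans = []
--     idx = 0
--     while idx + 1 < len(lines):
--         a = sorted(lines[idx])
--         b = sorted(lines[idx + 1])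
--         idx += 2
--         i = j = 0
--         out = []
--         while i < len(a) and j < len(b):
--             if a[i] == b[j]:
--                 out.append(a[i])
--                 i += 1
--                 j += 1
--             elif a[i] < b[j]:
--                 i += 1
--             else:
--                 j += 1
--         ans.append("".join(out))
--     return "\n".join(ans)
-- ===== Notes on version B (the rewrite author's own statement) =====
-- stated objective: alternative
-- what changed: Counter frequency dicts plus sorted key-set intersection are replaced per pair by sorting both strings and running a two-pointer merge that emits a char on equality and advances the smaller side, producing the min-count common characters directly in sorted order.
import Mathlib
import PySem

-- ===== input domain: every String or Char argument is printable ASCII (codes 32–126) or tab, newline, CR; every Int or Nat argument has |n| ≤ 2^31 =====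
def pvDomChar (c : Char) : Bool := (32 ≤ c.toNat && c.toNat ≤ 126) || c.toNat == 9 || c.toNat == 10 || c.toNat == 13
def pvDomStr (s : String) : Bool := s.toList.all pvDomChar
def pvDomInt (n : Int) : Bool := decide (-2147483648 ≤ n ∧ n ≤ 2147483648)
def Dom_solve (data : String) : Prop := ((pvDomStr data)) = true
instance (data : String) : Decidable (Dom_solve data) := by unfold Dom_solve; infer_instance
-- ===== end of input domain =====

-- B replaces A's per-pair Counter dicts + sorted key-set intersection by a two-pointer
-- merge of the two sorted character lists (alternative decomposition, similar cost).

-- ===== PORT A =====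
-- one pair of lines: Counter both, iterate the sorted common keys, min counts
def solveAPair (s1 s2 : String) : String :=
  let c1 := PySem.Dict.counter s1.toList
  let c2 := PySem.Dict.counter s2.toList
  let commonChars := PySem.List.sorted (PySem.Set.inter (PySem.Dict.keys c1) (PySem.Dict.keys c2)) (fun x => x) false
  let parts := commonChars.foldl (fun acc ch =>
      acc ++ [String.ofList (PySem.List.pyRepeat [ch] (min (c1.getD ch 0) (c2.getD ch 0)))]) ([] : List String)
  PySem.Str.join "" parts

-- the `while idx + 1 < len(lines)` loop: two lines consumed per step
def solveLoopA : List String → List String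
  | s1 :: s2 :: rest => solveAPair s1 s2 :: solveLoopA rest
  | _ => []

def solve (data : String) : String :=
  PySem.Str.join "\n" (solveLoopA (PySem.Str.splitlines data))

-- ===== PORT B =====
-- the inner two-pointer while loop of Source B, as recursion on the two sorted lists
def mergeCommon : List Char → List Char → List Char
  | [], _ => []
  | _ :: _, [] => []
  | a :: l1, b :: l2 =>
    if a = b then a :: mergeCommon l1 l2
    else if a < b then mergeCommon l1 (b :: l2)
    else mergeCommon (a :: l1) l2
termination_by l1 l2 => l1.length + l2.length

def solveAltPair (s1 s2 : String) : String :=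
  String.ofList (mergeCommon (PySem.List.sorted s1.toList (fun x => x) false)
                             (PySem.List.sorted s2.toList (fun x => x) false))

-- the same outer pairing loop as in Source B
def solveLoopB : List String → List String
  | s1 :: s2 :: rest => solveAltPair s1 s2 :: solveLoopB rest
  | _ => []

def solve_alt (data : String) : String :=
  PySem.Str.join "\n" (solveLoopB (PySem.Str.splitlines data))

-- ===== PRECONDITION & SPEC =====
def Spec_solve (data : String) (out : String) : Prop := out = solve_alt data
instance (data : String) (out : String) : Decidable (Spec_solve data out) := by unfold Spec_solve; infer_instance

-- ===== CLAIM (what is proved, stated in full; the proofs are below) =====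
def Claim_equal_solve : Prop := ∀ (data : String), Dom_solve data → Spec_solve data (solve data)

-- ===== LEMMAS AND PROOFS =====

theorem mergeCommon_sublist (l1 l2 : List Char) : (mergeCommon l1 l2).Sublist l1 := by
  induction l1, l2 using mergeCommon.induct with
  | case1 l2 => simp [mergeCommon]
  | case2 a l1 => simp [mergeCommon]
  | case3 l1 b l2 ih =>
    rw [mergeCommon]; simp only [reduceIte]
    exact ih.cons₂ b
  | case4 a l1 b l2 hab hlt ih =>
    rw [mergeCommon]; simp only [if_neg hab, if_pos hlt]
    exact ih.cons a
  | case5 a l1 b l2 hab hlt ih =>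
    rw [mergeCommon]; simp only [if_neg hab, if_neg hlt]
    exact ih

theorem mergeCommon_count (l1 l2 : List Char)
    (h1 : l1.Pairwise (· ≤ ·)) (h2 : l2.Pairwise (· ≤ ·)) (c : Char) :
    (mergeCommon l1 l2).count c = min (l1.count c) (l2.count c) := by
  induction l1, l2 using mergeCommon.induct with
  | case1 l2 => simp [mergeCommon]
  | case2 a l1 => simp [mergeCommon]
  | case3 l1 b l2 ih =>
    rw [mergeCommon]; simp only [reduceIte]
    have := ih (List.Pairwise.sublist (List.sublist_cons_self b l1) h1)
      (List.Pairwise.sublist (List.sublist_cons_self b l2) h2)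
    simp [List.count_cons, this]
  | case4 a l1 b l2 hab hlt ih =>
    rw [mergeCommon]; simp only [if_neg hab, if_pos hlt]
    have ih' := ih (List.Pairwise.sublist (List.sublist_cons_self a l1) h1) h2
    rw [ih']
    by_cases hc : c = a
    · subst hc
      have hz : (b :: l2).count c = 0 := by
        apply List.count_eq_zero_of_not_mem
        intro hmem
        rcases List.mem_cons.mp hmem with h | h
        · exact hab h
        · have := (List.pairwise_cons.mp h2).1 _ h
          exact absurd (lt_of_lt_of_le hlt this) (lt_irrefl c)
      rw [hz]
      simp
    · have hca : a ≠ c := fun h => hc h.symm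
      simp [List.count_cons, hca]
  | case5 a l1 b l2 hab hlt ih =>
    rw [mergeCommon]; simp only [if_neg hab, if_neg hlt]
    have hba : b < a := by
      rcases lt_trichotomy a b with h | h | h
      · exact absurd h hlt
      · exact absurd h hab
      · exact h
    have ih' := ih h1 (List.Pairwise.sublist (List.sublist_cons_self b l2) h2)
    rw [ih']
    by_cases hc : c = b
    · subst hc
      have hz : (a :: l1).count c = 0 := by
        apply List.count_eq_zero_of_not_mem
        intro hmem
        rcases List.mem_cons.mp hmem with h | h
        · exact absurd h (ne_of_lt hba)
        · have := (List.pairwise_cons.mp h1).1 _ h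
          exact absurd (lt_of_lt_of_le hba this) (lt_irrefl c)
      rw [hz]
      simp
    · have hcb : b ≠ c := fun h => hc h.symm
      simp [List.count_cons, hcb]

theorem count_flatMap_replicate (L : List Char) (hL : L.Nodup) (n : Char → Nat) (c : Char) :
    (L.flatMap (fun ch => List.replicate (n ch) ch)).count c = if c ∈ L then n c else 0 := by
  induction L with
  | nil => simp
  | cons a L ih =>
    rw [List.flatMap_cons, List.count_append, ih (List.Nodup.of_cons hL)]
    by_cases hc : c = a
    · subst hc
      have : c ∉ L := (List.nodup_cons.mp hL).1
      simp [this]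
    · simp [List.count_replicate, hc, Ne.symm hc]

theorem pairwise_flatMap_replicate (L : List Char) (hL : L.Pairwise (· < ·)) (n : Char → Nat) :
    (L.flatMap (fun ch => List.replicate (n ch) ch)).Pairwise (· ≤ ·) := by
  induction L with
  | nil => simp
  | cons a L ih =>
    rw [List.flatMap_cons, List.pairwise_append]
    refine ⟨?_, ih (List.Pairwise.of_cons hL), ?_⟩
    · exact List.pairwise_replicate.mpr (Or.inr (le_refl a))
    · intro x hx y hy
      have hxa : x = a := List.eq_of_mem_replicate hx
      obtain ⟨ch, hch, hy'⟩ := List.mem_flatMap.mp hy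
      have hya : y = ch := List.eq_of_mem_replicate hy'
      subst hxa hya
      exact le_of_lt ((List.pairwise_cons.mp hL).1 _ hch)

theorem chars_join_nil_eq_flatten (parts : List (List Char)) :
    PySem.Chars.join [] parts = parts.flatten := by
  match parts with
  | [] => simp [PySem.Chars.join_nil]
  | [a] => simp [PySem.Chars.join_singleton]
  | a :: b :: rest =>
    rw [PySem.Chars.join_cons_cons, chars_join_nil_eq_flatten (b :: rest)]
    simp

theorem flatten_flatMap_singleton (L : List Char) (g : Char → List Char) :
    (L.flatMap (fun a => [g a])).flatten = L.flatMap g := by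
  induction L with
  | nil => simp
  | cons a L ih => simp [ih]

theorem nodup_inter (s t : PySem.Set Char) (h : s.Nodup) : (PySem.Set.inter s t).Nodup := by
  simp only [PySem.Set.inter]
  exact List.Nodup.filter _ h

theorem mem_inter (s t : PySem.Set Char) (c : Char) : c ∈ PySem.Set.inter s t ↔ (c ∈ s ∧ c ∈ t) := by
  simp [PySem.Set.inter]

theorem merge_eq_flatMap (l1 l2 : List Char) :
    mergeCommon (PySem.List.sorted l1 (fun x => x) false) (PySem.List.sorted l2 (fun x => x) false)
      = (PySem.List.sorted (PySem.Set.inter (PySem.Set.ofList l1) (PySem.Set.ofList l2)) (fun x => x) false).flatMap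
          (fun ch => List.replicate (min (l1.count ch) (l2.count ch)) ch) := by
  set L := PySem.List.sorted (PySem.Set.inter (PySem.Set.ofList l1) (PySem.Set.ofList l2)) (fun x => x) false with hL
  have hndL : L.Nodup := by
    rw [(PySem.List.sorted_perm _ _ _).nodup_iff]
    exact nodup_inter _ _ (PySem.Set.nodup_ofList l1)
  have hmemL : ∀ c, c ∈ L ↔ (c ∈ l1 ∧ c ∈ l2) := by
    intro c
    rw [hL, PySem.List.mem_sorted, mem_inter, PySem.Set.mem_ofList, PySem.Set.mem_ofList]
  have hleL : L.Pairwise (· ≤ ·) := PySem.List.sorted_pairwise _ _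
  have hltL : L.Pairwise (· < ·) := (hleL.and hndL).imp (fun h => lt_of_le_of_ne h.1 h.2)
  have hp1 : (PySem.List.sorted l1 (fun x => x) false).Pairwise (· ≤ ·) := PySem.List.sorted_pairwise _ _
  have hp2 : (PySem.List.sorted l2 (fun x => x) false).Pairwise (· ≤ ·) := PySem.List.sorted_pairwise _ _
  apply List.Perm.eq_of_pairwise (le := (· ≤ ·))
  · exact fun a b _ _ h1 h2 => le_antisymm h1 h2
  · exact List.Pairwise.sublist (mergeCommon_sublist _ _) hp1
  · exact pairwise_flatMap_replicate L hltL _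
  · apply List.perm_iff_count.mpr
    intro c
    rw [mergeCommon_count _ _ hp1 hp2, (PySem.List.sorted_perm l1 _ _).count_eq,
      (PySem.List.sorted_perm l2 _ _).count_eq, count_flatMap_replicate L hndL]
    by_cases h : c ∈ l1 ∧ c ∈ l2
    · rw [if_pos ((hmemL c).mpr h)]
    · rw [if_neg (fun hm => h ((hmemL c).mp hm))]
      rcases Decidable.not_and_iff_not_or_not.mp h with h | h
      · rw [List.count_eq_zero_of_not_mem h]; omega
      · rw [List.count_eq_zero_of_not_mem h]; omega

theorem pair_eq (s1 s2 : String) : solveAPair s1 s2 = solveAltPair s1 s2 := by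
  apply String.toList_inj.mp
  unfold solveAPair solveAltPair
  simp only [PySem.Dict.keys_counter, PySem.List.foldl_append_eq_flatMap, List.nil_append,
    PySem.Str.toList_join, String.toList_ofList, List.map_flatMap, List.map_cons, List.map_nil,
    PySem.List.pyRepeat_singleton, PySem.Dict.getD_counter,
    show ("" : String).toList = [] from rfl, chars_join_nil_eq_flatten]
  rw [flatten_flatMap_singleton, merge_eq_flatMap]
  simp only [← Nat.cast_min, Int.toNat_natCast]

theorem loop_eq (lines : List String) : solveLoopA lines = solveLoopB lines := by
  induction lines using solveLoopA.induct with
  | case1 s1 s2 rest ih => rw [solveLoopA, solveLoopB, pair_eq, ih]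
  | case2 l h => cases l with
    | nil => rfl
    | cons s t => cases t with
      | nil => rfl
      | cons a b => exact absurd rfl (h s a b)

-- ===== VERDICT (by name: the statement is the Claim_ definition above) =====
theorem solve_spec : Claim_equal_solve := by
  intro data _
  unfold Spec_solve solve solve_alt
  rw [loop_eq]
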